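-- pv_equiv track=rewrite | github.com/pkehrer/advent_of_code_2024 | day9.py | find_free_spot
-- ===== SOURCE A (Python) =====
-- def find_free_spot(data, length, max_spot):
--     free_spot_start, free_spot_end = None, None
--     for i in range(len(data)):
--         if i > max_spot:
--             break
--         if data[i] is None:
--             if free_spot_start is None:
--                 free_spot_start = i
--             free_spot_end = i
--             if free_spot_end - free_spot_start + 1 == length:
--                 return free_spot_start, free_spot_end
--         else:
--             free_spot_start = None
--
--     return None, None
-- ===== SOURCE B (Python) =====
-- def _runs(xs):
--     # run-length-encode xs into (is_free, size) groups of consecutive equal None-ness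
--     runs = []
--     j = 0
--     while j < len(xs):
--         k = j + 1
--         while k < len(xs) and (xs[k] is None) == (xs[j] is None):
--             k += 1
--         runs.append((xs[j] is None, k - j))
--         j = k
--     return runs
--
--
-- def find_free_spot(data, length, max_spot):
--     i = 0
--     for is_free, size in _runs(data[:max(max_spot + 1, 0)]):
--         if is_free and 0 < length <= size:
--             return i, i + length - 1
--         i += size
--     return None, None
-- ===== Notes on version B (the rewrite author's own statement) =====
-- stated objective: alternative
-- what changed: B first run-length-encodes the prefix data[:max(max_spot+1,0)] into (is_free, size) groups and then scans the groups for the first free run of size >= length, instead of A's element-by-element scan tracking start/end sentinel variables with a break.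
import Mathlib
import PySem

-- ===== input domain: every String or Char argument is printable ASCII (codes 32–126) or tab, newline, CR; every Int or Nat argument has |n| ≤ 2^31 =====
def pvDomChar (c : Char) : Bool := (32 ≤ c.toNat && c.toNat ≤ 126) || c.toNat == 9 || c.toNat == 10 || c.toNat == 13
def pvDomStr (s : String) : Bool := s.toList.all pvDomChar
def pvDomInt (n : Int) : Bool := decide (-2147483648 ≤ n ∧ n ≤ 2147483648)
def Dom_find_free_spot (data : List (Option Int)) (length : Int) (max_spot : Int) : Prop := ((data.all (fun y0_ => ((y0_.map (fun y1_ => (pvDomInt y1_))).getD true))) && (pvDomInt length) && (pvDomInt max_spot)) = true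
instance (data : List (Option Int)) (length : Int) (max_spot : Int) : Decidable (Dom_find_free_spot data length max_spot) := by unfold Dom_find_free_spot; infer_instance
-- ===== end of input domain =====

-- B run-length-encodes the prefix into (is_free, size) groups and scans the groups,
-- instead of A's element scan with start/end sentinels; objective: alternative.

-- ===== PORT A =====
-- loop of A: index i over range(len(data)), state (free_spot_start, free_spot_end)
def ffsA_loop (data : List (Option Int)) (length max_spot : Int) (i : Nat)
    (start fend : Option Int) : Option Int × Option Int :=
  if h : i < data.length then
    if (i : Int) > max_spot then (none, none)
    else
      match data[i] with
      | none =>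
        let s : Int := match start with | none => (i : Int) | some s => s
        let e : Int := (i : Int)
        if e - s + 1 = length then (some s, some e)
        else ffsA_loop data length max_spot (i+1) (some s) (some e)
      | some _ => ffsA_loop data length max_spot (i+1) none fend
  else (none, none)
termination_by data.length - i

def find_free_spot (data : List (Option Int)) (length : Int) (max_spot : Int) : Option Int × Option Int :=
  ffsA_loop data length max_spot 0 none none

-- ===== PORT B =====
-- _runs: run-length-encode into (is_free, size) groups; the inner while loop that
-- extends the current run to its end is the takeWhile over the tail
def ffsRuns (xs : List (Option Int)) : List (Bool × Nat) :=
  match xs with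
  | [] => []
  | x :: rest =>
    let t := rest.takeWhile (fun y => y.isNone == x.isNone)
    (x.isNone, t.length + 1) :: ffsRuns (rest.drop t.length)
termination_by xs.length
decreasing_by simp

-- the for-loop over the groups, carrying the running start index i
def ffsScan (l : Int) (i : Int) (rs : List (Bool × Nat)) : Option Int × Option Int :=
  match rs with
  | [] => (none, none)
  | (b, n) :: rest =>
    if b && decide (0 < l) && decide (l ≤ (n : Int)) then (some i, some (i + l - 1))
    else ffsScan l (i + n) rest

-- data[:max(max_spot+1, 0)] : the slice bound is clamped to ≥ 0, so it is List.take
def find_free_spot_alt (data : List (Option Int)) (length : Int) (max_spot : Int) : Option Int × Option Int :=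
  ffsScan length 0 (ffsRuns (data.take (max (max_spot + 1) 0).toNat))

-- ===== PRECONDITION & SPEC =====
def Spec_find_free_spot (data : List (Option Int)) (length : Int) (max_spot : Int) (out : Option Int × Option Int) : Prop := out = find_free_spot_alt data length max_spot
instance (data : List (Option Int)) (length : Int) (max_spot : Int) (out : Option Int × Option Int) : Decidable (Spec_find_free_spot data length max_spot out) := by unfold Spec_find_free_spot; infer_instance

-- ===== CLAIM (what is proved, stated in full; the proofs are below) =====
def Claim_equal_find_free_spot : Prop := ∀ (data : List (Option Int)) (length : Int) (max_spot : Int), Dom_find_free_spot data length max_spot → Spec_find_free_spot data length max_spot (find_free_spot data length max_spot)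

-- ===== LEMMAS AND PROOFS =====

-- proof-side intermediate: A's loop reformulated as a run-length counter walk
def ffsC (l : Int) (c : Int) (i : Int) (xs : List (Option Int)) : Option Int × Option Int :=
  match xs with
  | [] => (none, none)
  | some _ :: rest => ffsC l 0 (i+1) rest
  | none :: rest =>
    if c + 1 = l then (some (i - l + 1), some i)
    else ffsC l (c+1) (i+1) rest

-- the prefix B scans, as seen from index i
lemma pv_drop_nil (data : List (Option Int)) (m : Int) (i : Nat)
    (h : data.length ≤ i ∨ (m : Int) < (i : Int)) :
    (data.take (max (m + 1) 0).toNat).drop i = [] := by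
  apply List.drop_eq_nil_of_le
  simp only [List.length_take]
  omega

lemma pv_drop_cons (data : List (Option Int)) (m : Int) (i : Nat)
    (h1 : i < data.length) (h2 : (i : Int) ≤ m) :
    (data.take (max (m + 1) 0).toNat).drop i
      = data[i] :: (data.take (max (m + 1) 0).toNat).drop (i+1) := by
  have hk : i < (max (m + 1) 0).toNat := by omega
  have hlen : i < (data.take (max (m + 1) 0).toNat).length := by
    simp [List.length_take]; omega
  rw [List.drop_eq_getElem_cons hlen]
  congr 1
  simp [List.getElem_take]

lemma ffs_bridge (data : List (Option Int)) (l m : Int) :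
    ∀ n i, data.length ≤ i + n →
      (∀ e, ffsA_loop data l m i none e
          = ffsC l 0 (i : Int) ((data.take (max (m + 1) 0).toNat).drop i))
      ∧ (∀ e s, ffsA_loop data l m i (some s) e
          = ffsC l ((i : Int) - s) (i : Int) ((data.take (max (m + 1) 0).toNat).drop i)) := by
  intro n
  induction n with
  | zero =>
    intro i hi
    have hge : data.length ≤ i := by omega
    rw [pv_drop_nil data m i (Or.inl hge)]
    constructor
    · intro e; rw [ffsA_loop]; simp [Nat.not_lt.mpr hge, ffsC]
    · intro e s; rw [ffsA_loop]; simp [Nat.not_lt.mpr hge, ffsC]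
  | succ n ih =>
    intro i hi
    by_cases hlt : i < data.length
    · by_cases hm : (i : Int) ≤ m
      · rw [pv_drop_cons data m i hlt hm]
        have ih1 := (ih (i+1) (by omega)).1
        have ih2 := (ih (i+1) (by omega)).2
        rcases hx : data[i] with _ | v
        · constructor
          · intro e
            rw [ffsA_loop]
            simp only [dif_pos hlt, if_neg (not_lt.mpr hm), hx, ffsC]
            by_cases hc : (0 : Int) + 1 = l
            · have hl : l = 1 := by omega
              simp [hl]
            · have : ¬ ((i : Int) - (i : Int) + 1 = l) := by omega
              simp only [this, hc]
              have := ih2 (some (i : Int)) (i : Int)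
              simpa [Nat.cast_add, Nat.cast_one, sub_self] using this
          · intro e s
            rw [ffsA_loop]
            simp only [dif_pos hlt, if_neg (not_lt.mpr hm), hx, ffsC]
            by_cases hc : (i : Int) - s + 1 = l
            · have hs : s = (i : Int) - l + 1 := by omega
              subst hs
              have ht : (i : Int) - ((i : Int) - l + 1) + 1 = l := by omega
              simp [ht]
            · simp only [if_neg hc]
              have := ih2 (some (i : Int)) s
              have harith : ((i : Int) + 1) - s = ((i : Int) - s) + 1 := by ring
              simpa [Nat.cast_add, Nat.cast_one, harith] using this
        · constructor
          · intro e
            rw [ffsA_loop]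
            simp only [dif_pos hlt, if_neg (not_lt.mpr hm), hx, ffsC]
            simpa [Nat.cast_add, Nat.cast_one] using ih1 e
          · intro e s
            rw [ffsA_loop]
            simp only [dif_pos hlt, if_neg (not_lt.mpr hm), hx, ffsC]
            simpa [Nat.cast_add, Nat.cast_one] using ih1 e
      · have hnil := pv_drop_nil data m i (Or.inr (by omega))
        rw [hnil]
        constructor
        · intro e; rw [ffsA_loop]
          simp [dif_pos hlt, if_pos (lt_of_not_ge hm), ffsC]
        · intro e s; rw [ffsA_loop]
          simp [dif_pos hlt, if_pos (lt_of_not_ge hm), ffsC]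
    · have hge : data.length ≤ i := by omega
      rw [pv_drop_nil data m i (Or.inl hge)]
      constructor
      · intro e; rw [ffsA_loop]; simp [Nat.not_lt.mpr hge, ffsC]
      · intro e s; rw [ffsA_loop]; simp [Nat.not_lt.mpr hge, ffsC]

-- walking a block of k Nones from counter c
lemma ffsC_nones (l : Int) :
    ∀ (k : Nat) (c i : Int) (ys : List (Option Int)),
      ffsC l c i (List.replicate k none ++ ys)
        = if c < l ∧ l ≤ c + k then (some (i - c), some (i + (l - c) - 1))
          else ffsC l (c + k) (i + k) ys := by
  intro k
  induction k with
  | zero =>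
    intro c i ys
    simp only [List.replicate_zero, List.nil_append, Nat.cast_zero, add_zero]
    rw [if_neg (by omega)]
  | succ k ih =>
    intro c i ys
    rw [List.replicate_succ, List.cons_append]
    show (if c + 1 = l then (some (i - l + 1), some i)
          else ffsC l (c+1) (i+1) (List.replicate k none ++ ys)) = _
    by_cases hc : c + 1 = l
    · have hcond : c < l ∧ l ≤ c + ((k+1:Nat) : Int) := by push_cast; omega
      rw [if_pos hc, if_pos hcond]
      simp only [Prod.mk.injEq, Option.some.injEq]
      omega
    · rw [if_neg hc, ih]
      by_cases h2 : c + 1 < l ∧ l ≤ c + 1 + k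
      · have hcond : c < l ∧ l ≤ c + ((k+1:Nat) : Int) := by push_cast at h2 ⊢; omega
        rw [if_pos h2, if_pos hcond]
        simp only [Prod.mk.injEq, Option.some.injEq]
        omega
      · have hcond : ¬ (c < l ∧ l ≤ c + ((k+1:Nat) : Int)) := by push_cast at h2 ⊢; omega
        rw [if_neg h2, if_neg hcond]
        congr 1 <;> omega

-- walking a block of Somes resets the counter and advances the index
lemma ffsC_somes (l : Int) :
    ∀ (t : List (Option Int)), (∀ y ∈ t, y.isSome) →
      ∀ (i : Int) (ys : List (Option Int)),
        ffsC l 0 i (t ++ ys) = ffsC l 0 (i + t.length) ys := by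
  intro t
  induction t with
  | nil =>
    intro _ i ys
    simp
  | cons x rest ih =>
    intro h i ys
    have hx : x.isSome := h x (by simp)
    rcases x with _ | v
    · simp at hx
    · show ffsC l 0 (i+1) (rest ++ ys) = _
      rw [ih (fun y hy => h y (by simp [hy])) (i+1) ys]
      congr 1
      simp only [List.length_cons]
      push_cast; omega

-- if the list is empty or starts with a Some, the counter value is irrelevant
lemma ffsC_reset (l c i : Int) (d : List (Option Int))
    (h : ∀ y ∈ d.head?, y.isSome) :
    ffsC l c i d = ffsC l 0 i d := by
  rcases d with _ | ⟨x, rest⟩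
  · rfl
  · rcases x with _ | v
    · simp at h
    · rfl

-- main correspondence: the counter walk equals the scan over the run-length encoding
lemma ffsC_eq_scan (l : Int) :
    ∀ (n : Nat) (xs : List (Option Int)), xs.length ≤ n → ∀ (i : Int),
      ffsC l 0 i xs = ffsScan l i (ffsRuns xs) := by
  intro n
  induction n with
  | zero =>
    intro xs h i
    have : xs = [] := List.eq_nil_of_length_eq_zero (by omega)
    subst this; simp [ffsC, ffsScan, ffsRuns]
  | succ n ih =>
    intro xs h i
    rcases xs with _ | ⟨x, rest⟩
    · simp [ffsC, ffsScan, ffsRuns]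
    · rw [ffsRuns.eq_def]
      simp only []
      set p := fun y : Option Int => y.isNone == x.isNone with hp
      set t := rest.takeWhile p with ht
      set d := rest.dropWhile p with hd
      have hsplit : rest = t ++ d := (List.takeWhile_append_dropWhile).symm
      have hdrop : rest.drop t.length = d := by
        rw [hsplit]; simp [ht]
      have hdlen : d.length ≤ rest.length := by
        conv_rhs => rw [hsplit]
        simp
      have hdhead : ∀ y ∈ d.head?, p y = false := by
        intro y hy
        rcases hdd : d with _ | ⟨z, ds⟩
        · simp [hdd] at hy
        · simp [hdd] at hy
          subst hy
          have := List.head?_dropWhile_not p rest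
          rw [← hd] at this
          simp [hdd] at this
          exact this
      rcases x with _ | v
      · -- x is None: leading run of t.length+1 Nones
        have htn : ∀ y ∈ t, y = none := by
          intro y hy
          have := List.mem_takeWhile_imp hy
          simp [hp] at this
          exact this
        have hrep : (none : Option Int) :: rest
            = List.replicate (t.length + 1) (none : Option Int) ++ d := by
          rw [List.replicate_succ, List.cons_append]
          congr 1
          conv_lhs => rw [hsplit]
          congr 1
          exact (List.eq_replicate_iff.mpr ⟨rfl, htn⟩)
        rw [hrep, ffsC_nones]
        have hdsome : ∀ y ∈ d.head?, y.isSome := by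
          intro y hy
          have := hdhead y hy
          simp [hp] at this
          rcases y with _ | w
          · simp at this
          · simp
        rw [hdrop]
        show _ = ffsScan l i ((true, t.length + 1) :: ffsRuns d)
        rw [ffsScan]
        by_cases hcond : (0:Int) < l ∧ l ≤ (0:Int) + ((t.length + 1 : Nat) : Int)
        · have hbool : (true && decide (0 < l) && decide (l ≤ ((t.length + 1 : Nat) : Int))) = true := by
            simp only [Bool.true_and, Bool.and_eq_true, decide_eq_true_eq]
            push_cast at hcond ⊢
            omega
          rw [if_pos hcond, if_pos hbool]
          simp
        · have hbool : ¬ ((true && decide (0 < l) && decide (l ≤ ((t.length + 1 : Nat) : Int))) = true) := by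
            simp only [Bool.true_and, Bool.and_eq_true, decide_eq_true_eq]
            push_cast at hcond ⊢
            omega
          rw [if_neg hcond, if_neg hbool]
          rw [ffsC_reset l _ _ d hdsome]
          exact ih d (by simp only [List.length_cons] at h; omega) _
      · -- x is Some: leading run of t.length+1 Somes
        have hts : ∀ y ∈ ((some v : Option Int) :: t), y.isSome := by
          intro y hy
          rcases List.mem_cons.mp hy with hy | hy
          · subst hy; rfl
          · have := List.mem_takeWhile_imp hy
            simp [hp] at this
            rcases y with _ | w
            · simp at this
            · rfl
        have htall : ∀ y ∈ t, y.isSome := fun y hy => hts y (List.mem_cons_of_mem _ hy)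
        show ffsC l 0 (i+1) rest = _
        conv_lhs => rw [hsplit]
        rw [ffsC_somes l t htall (i+1) d, hdrop]
        show _ = ffsScan l i ((false, t.length + 1) :: ffsRuns d)
        rw [ffsScan]
        simp only [Bool.false_and, Bool.false_eq_true, if_false]
        rw [ih d (by simp only [List.length_cons] at h; omega) ((i+1) + (t.length : Nat))]
        congr 1
        push_cast; ring

-- ===== VERDICT (by name: the statement is the Claim_ definition above) =====
theorem find_free_spot_spec : Claim_equal_find_free_spot := by
  intro data l m _
  unfold Spec_find_free_spot find_free_spot find_free_spot_alt
  have h := (ffs_bridge data l m data.length 0 (by omega)).1 none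
  simp only [Nat.cast_zero, List.drop_zero] at h
  rw [h]
  exact ffsC_eq_scan l (data.take (max (m + 1) 0).toNat).length _ (le_refl _) 0
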